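-- pv_equiv track=rewrite | github.com/Mahmoodmubarak/Projects | Internship_project/Cpk_modules/getHistrogram.py | getFreqTable
-- ===== SOURCE A (Python) =====
-- def getFreqTable(arr, Range, bins, BinsRange, IDX):
--     """
--     This function create a dictionary with key as bin label and value as frequency of values with in that bin range.
--     @param arr list of samples.
--     @param Range range of sample distribution.
--     @param bins number of bins defined in configuration file.
--     @param BinsRange list of maximum value of bins.
--     @param IDX group number.
--     @return freqDict dictionary.
--     """
--     freqDict = {}
--     for i in range(bins):
--         Id = 'B' + str(i + 1) + '_' + IDX
--         if Range == 0.0: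
--             count = 0
--         else:
--             count = len([x for x in arr if BinsRange[i] <= x <= BinsRange[i+1]])
--         freqDict[Id] = count
--     return freqDict
-- ===== SOURCE B (Python) =====
-- from bisect import bisect_left, bisect_right
--
-- def getFreqTable(arr, Range, bins, BinsRange, IDX):
--     s = sorted(arr)
--     freqDict = {}
--     for i in range(bins):
--         if Range == 0.0:
--             count = 0
--         else:
--             count = max(0, bisect_right(s, BinsRange[i + 1]) - bisect_left(s, BinsRange[i]))
--         freqDict['B' + str(i + 1) + '_' + IDX] = count
--     return freqDict
-- ===== Notes on version B (the rewrite author's own statement) =====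
-- stated objective: faster
-- what changed: B sorts arr once and computes each bin's count as a clamped bisect_right-minus-bisect_left difference on the sorted array, instead of A's per-bin linear scan of arr.
-- outside the precondition, e.g. on getFreqTable([], 1, 2, [5], 'g'): A returns {'B1_g': 0, 'B2_g': 0}, B raises IndexError
import Mathlib
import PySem

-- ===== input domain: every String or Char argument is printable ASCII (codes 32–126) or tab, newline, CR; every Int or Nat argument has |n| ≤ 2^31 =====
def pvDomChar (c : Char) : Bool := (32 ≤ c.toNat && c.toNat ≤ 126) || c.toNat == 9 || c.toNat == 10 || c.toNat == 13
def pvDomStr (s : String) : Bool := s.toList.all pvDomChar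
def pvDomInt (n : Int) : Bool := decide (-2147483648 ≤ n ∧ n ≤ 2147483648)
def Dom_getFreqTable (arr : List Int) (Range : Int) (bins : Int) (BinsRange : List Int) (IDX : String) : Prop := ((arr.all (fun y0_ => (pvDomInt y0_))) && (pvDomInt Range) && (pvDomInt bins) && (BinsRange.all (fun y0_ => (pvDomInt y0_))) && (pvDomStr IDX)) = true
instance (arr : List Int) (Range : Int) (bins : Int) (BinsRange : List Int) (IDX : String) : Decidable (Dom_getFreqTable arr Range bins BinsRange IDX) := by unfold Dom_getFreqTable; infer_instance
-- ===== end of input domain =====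

-- B sorts arr once and counts each bin with bisect_right/bisect_left instead of scanning arr per bin.
-- Equivalence is about the return value; neither version mutates its arguments.

-- ===== PORT A =====
-- A indexes BinsRange[i], BinsRange[i+1] inside the comprehension; pyGetD's default 0 is
-- unreachable inside Pre_, which excludes the inputs where Python raises IndexError.
def getFreqTable (arr : List Int) (Range : Int) (bins : Int) (BinsRange : List Int) (IDX : String) : List (String × Int) :=
  ((PySem.List.pyRange 0 bins 1).foldl (fun freqDict i =>
      let Id := "B" ++ PySem.Int.toStr (i + 1) ++ "_" ++ IDX
      let count : Int :=
        if Range = 0 then 0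
        else ((arr.filter (fun x =>
                decide (PySem.List.pyGetD BinsRange i 0 ≤ x) &&
                decide (x ≤ PySem.List.pyGetD BinsRange (i + 1) 0))).length : Int)
      freqDict.insert Id count)
    (PySem.Dict.empty : PySem.Dict String Int)).items

-- ===== PORT B =====
-- bisect.bisect_left / bisect.bisect_right are PySem.List.bisectLeft / bisectRight.
def getFreqTable_alt (arr : List Int) (Range : Int) (bins : Int) (BinsRange : List Int) (IDX : String) : List (String × Int) :=
  let s := PySem.List.sorted arr (fun x => x) false
  ((PySem.List.pyRange 0 bins 1).foldl (fun freqDict i =>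
      let count : Int :=
        if Range = 0 then 0
        else max 0 ((PySem.List.bisectRight s (PySem.List.pyGetD BinsRange (i + 1) 0) : Int)
                  - (PySem.List.bisectLeft s (PySem.List.pyGetD BinsRange i 0) : Int))
      freqDict.insert ("B" ++ PySem.Int.toStr (i + 1) ++ "_" ++ IDX) count)
    (PySem.Dict.empty : PySem.Dict String Int)).items

-- ===== PRECONDITION & SPEC =====
-- Pre_ excludes exactly the inputs where the Python indexing BinsRange[i]/BinsRange[i+1] is out of
-- range for some visited bin.  A raises IndexError there whenever arr is nonempty; when arr is empty
-- A's comprehension never evaluates the index (an accident of lazy evaluation) and returns all-zero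
-- counts, while B's bisect calls evaluate BinsRange[i+1] unconditionally and raise — those
-- empty-arr inputs are excluded too, since B itself raises on them.
def Pre_getFreqTable (arr : List Int) (Range : Int) (bins : Int) (BinsRange : List Int) (IDX : String) : Prop :=
  Range = 0 ∨ bins ≤ 0 ∨ bins + 1 ≤ (BinsRange.length : Int)
instance (arr : List Int) (Range : Int) (bins : Int) (BinsRange : List Int) (IDX : String) : Decidable (Pre_getFreqTable arr Range bins BinsRange IDX) := by unfold Pre_getFreqTable; infer_instance

def pvWitness_getFreqTable : List Int × Int × Int × List Int × String := ([0, 3, 5], 10, 2, [0, 2, 4], "g1")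

def Spec_getFreqTable (arr : List Int) (Range : Int) (bins : Int) (BinsRange : List Int) (IDX : String) (out : List (String × Int)) : Prop := out = getFreqTable_alt arr Range bins BinsRange IDX
instance (arr : List Int) (Range : Int) (bins : Int) (BinsRange : List Int) (IDX : String) (out : List (String × Int)) : Decidable (Spec_getFreqTable arr Range bins BinsRange IDX out) := by unfold Spec_getFreqTable; infer_instance

-- ===== CLAIM (what is proved, stated in full; the proofs are below) =====
def Claim_equal_getFreqTable : Prop := ∀ (arr : List Int) (Range : Int) (bins : Int) (BinsRange : List Int) (IDX : String), Dom_getFreqTable arr Range bins BinsRange IDX → Pre_getFreqTable arr Range bins BinsRange IDX → Spec_getFreqTable arr Range bins BinsRange IDX (getFreqTable arr Range bins BinsRange IDX)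

-- ===== LEMMAS AND PROOFS =====

-- countP of a predicate that is true exactly on the indices below m equals m.
theorem pv_countP_eq_of_cut (l : List Int) (p : Int → Bool) (m : Nat) (hm : m ≤ l.length)
    (h1 : ∀ j (hj : j < l.length), j < m → p l[j])
    (h2 : ∀ j (hj : j < l.length), m ≤ j → p l[j] = false) : l.countP p = m := by
  rw [← List.take_append_drop m l, List.countP_append]
  have ht : (l.take m).countP p = (l.take m).length := by
    rw [List.countP_eq_length]
    intro a ha
    obtain ⟨j, hj, rfl⟩ := List.mem_iff_getElem.1 ha
    simp only [List.getElem_take]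
    exact h1 j (by simp at hj; omega) (by simp at hj; omega)
  have hd : (l.drop m).countP p = 0 := by
    rw [List.countP_eq_zero]
    intro a ha
    obtain ⟨j, hj, rfl⟩ := List.mem_iff_getElem.1 ha
    rw [List.getElem_drop]
    simp [h2 (m + j) (by simp at hj; omega) (by omega)]
  rw [ht, hd, List.length_take]
  omega

theorem pv_bisectRight_eq_countP (s : List Int) (v : Int)
    (hs : s.Pairwise (fun a b => a ≤ b)) :
    PySem.List.bisectRight s v = s.countP (fun x => decide (x ≤ v)) := by
  obtain ⟨hle, hlt, hgt⟩ := PySem.List.bisectRight_spec s v hs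
  exact (pv_countP_eq_of_cut s _ _ hle
    (fun j hj h => by simpa using hlt j hj h)
    (fun j hj h => by simpa using not_le.2 (hgt j hj h))).symm

theorem pv_bisectLeft_eq_countP (s : List Int) (v : Int)
    (hs : s.Pairwise (fun a b => a ≤ b)) :
    PySem.List.bisectLeft s v = s.countP (fun x => decide (x < v)) := by
  obtain ⟨hle, hlt, hgt⟩ := PySem.List.bisectLeft_spec s v hs
  exact (pv_countP_eq_of_cut s _ _ hle
    (fun j hj h => by simpa using hlt j hj h)
    (fun j hj h => by simpa using not_lt.2 (hgt j hj h))).symm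

theorem pv_countP_split (l : List Int) (lo hi : Int) (h : lo ≤ hi) :
    l.countP (fun x => decide (x ≤ hi))
      = l.countP (fun x => decide (x < lo))
        + l.countP (fun x => decide (lo ≤ x) && decide (x ≤ hi)) := by
  induction l with
  | nil => simp
  | cons a t ih =>
      simp only [List.countP_cons, ih]
      by_cases hlo : lo ≤ a <;> by_cases hhi : a ≤ hi <;>
        simp only [hlo, hhi, decide_true, decide_false, Bool.and_true, Bool.and_false,
          decide_eq_true_eq, show (a < lo) = ¬ (lo ≤ a) from by simp [not_le]] <;>
        simp <;> omega

-- the per-bin count: A's filter over arr equals B's clamped bisect difference over sorted arr.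
theorem pv_bin_count (arr : List Int) (lo hi : Int) :
    ((arr.filter (fun x => decide (lo ≤ x) && decide (x ≤ hi))).length : Int)
      = max 0 ((PySem.List.bisectRight (PySem.List.sorted arr (fun x => x) false) hi : Int)
             - (PySem.List.bisectLeft (PySem.List.sorted arr (fun x => x) false) lo : Int)) := by
  set s := PySem.List.sorted arr (fun x => x) false with hsdef
  have hs : s.Pairwise (fun a b => a ≤ b) := PySem.List.sorted_pairwise arr (fun x => x)
  have hperm : s.Perm arr := PySem.List.sorted_perm arr (fun x => x) false
  rw [pv_bisectRight_eq_countP s hi hs, pv_bisectLeft_eq_countP s lo hs,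
      hperm.countP_eq, hperm.countP_eq, ← List.countP_eq_length_filter]
  by_cases h : lo ≤ hi
  · have := pv_countP_split arr lo hi h
    omega
  · have h0 : arr.countP (fun x => decide (lo ≤ x) && decide (x ≤ hi)) = 0 := by
      rw [List.countP_eq_zero]
      intro a _
      simp only [Bool.and_eq_true, decide_eq_true_eq, not_and]
      omega
    have hle : arr.countP (fun x => decide (x ≤ hi)) ≤ arr.countP (fun x => decide (x < lo)) :=
      List.countP_mono_left (fun x _ hx => by simp at hx ⊢; omega)
    omega

-- ===== VERDICT (by name: the statement is the Claim_ definition above) =====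
theorem getFreqTable_spec : Claim_equal_getFreqTable := by
  intro arr Range bins BinsRange IDX _ _
  unfold Spec_getFreqTable getFreqTable getFreqTable_alt
  refine congrArg PySem.Dict.items ?_
  refine PySem.List.foldl_congr_mem _ _ _ _ ?_
  intro d i _
  by_cases hR : Range = 0
  · simp [hR]
  · simp only [hR, if_false]
    rw [pv_bin_count arr (PySem.List.pyGetD BinsRange i 0) (PySem.List.pyGetD BinsRange (i + 1) 0)]
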